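-- pv_equiv track=rewrite | github.com/SolomiaKukharuk/programming1 | laba7/7_8.py | nskd
-- ===== SOURCE A (Python) =====
-- def nskd(c,d):
--     lst = []
--     for i in range(1,d + 1):
--         if i % c == 0:
--             lst.append(i)
--             if d % i != 0:
--                 lst.remove(i)
--
--     return len(lst) - 2
-- ===== SOURCE B (Python) =====
-- def nskd(c, d):
--     # Count divisors of d that are multiples of c (= tau(d//|c|) when |c| divides d),
--     # via trial division up to sqrt, then subtract 2.
--     if d < 1:
--         return -2
--     e = abs(c)
--     if d % e != 0:
--         return -2
--     n = d // e
--     cnt = 0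
--     i = 1
--     while i * i <= n:
--         if n % i == 0:
--             cnt += 1 if i * i == n else 2
--         i += 1
--     return cnt - 2
-- ===== Notes on version B (the rewrite author's own statement) =====
-- stated objective: faster
-- what changed: Instead of scanning all of 1..d and maintaining a list with append/remove, B reduces the problem to counting the divisors of d//|c| (the multiples of c dividing d are exactly c*m with m | d/|c|) by trial division up to sqrt.
import Mathlib
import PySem

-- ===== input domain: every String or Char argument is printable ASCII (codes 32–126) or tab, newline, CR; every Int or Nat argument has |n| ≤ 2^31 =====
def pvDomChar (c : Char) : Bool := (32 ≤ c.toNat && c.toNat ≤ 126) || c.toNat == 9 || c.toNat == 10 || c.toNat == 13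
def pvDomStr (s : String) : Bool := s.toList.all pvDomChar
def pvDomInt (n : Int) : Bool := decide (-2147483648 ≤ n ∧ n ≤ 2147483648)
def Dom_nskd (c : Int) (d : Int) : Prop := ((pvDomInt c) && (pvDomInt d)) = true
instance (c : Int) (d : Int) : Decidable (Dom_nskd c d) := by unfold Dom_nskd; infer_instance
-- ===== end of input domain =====

-- B replaces A's scan of all of 1..d (list with append/remove) by the reduction "the multiples of
-- c dividing d are exactly |c|*m with m dividing d/|c|" plus divisor counting by trial division
-- up to the square root.

-- ===== PORT A =====
-- loop body: if i % c == 0: lst.append(i); if d % i != 0: lst.remove(i)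
def nskdStep (c d : Int) (lst : List Int) (i : Int) : List Int :=
  if PySem.Int.mod i c = 0 then
    let lst2 := lst ++ [i]
    -- lst.remove(i) never raises here: i was just appended ((remove? …).getD is exact)
    if PySem.Int.mod d i ≠ 0 then (PySem.List.remove? lst2 i).getD lst2 else lst2
  else lst

def nskd (c : Int) (d : Int) : Int :=
  let lst := (PySem.List.pyRange 1 (d + 1) 1).foldl (nskdStep c d) []
  (lst.length : Int) - 2

-- ===== PORT B =====
-- while i*i <= n: if n % i == 0: cnt += 1 if i*i == n else 2; i += 1
def nskdAltLoop (n : Int) (i : Int) (cnt : Int) : Int :=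
  if h : i * i ≤ n then
    nskdAltLoop n (i + 1)
      (cnt + if PySem.Int.mod n i = 0 then (if i * i = n then 1 else 2) else 0)
  else cnt
termination_by (n + 1 - i).toNat
decreasing_by
  have hi : i ≤ n := by nlinarith [mul_self_nonneg i]
  omega

def nskd_alt (c : Int) (d : Int) : Int :=
  if d < 1 then -2
  else
    let e := |c|
    if PySem.Int.mod d e ≠ 0 then -2
    else nskdAltLoop (PySem.Int.floordiv d e) 1 0 - 2

-- ===== PRECONDITION & SPEC =====
-- Pre_ excludes exactly c = 0 with d ≥ 1, where A's 'i % c' raises ZeroDivisionError (B's 'd % e' raises there too).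
def Pre_nskd (c : Int) (d : Int) : Prop := c ≠ 0 ∨ d < 1
instance (c : Int) (d : Int) : Decidable (Pre_nskd c d) := by unfold Pre_nskd; infer_instance
def pvWitness_nskd : Int × Int := (2, 12)

def Spec_nskd (c : Int) (d : Int) (out : Int) : Prop := out = nskd_alt c d
instance (c : Int) (d : Int) (out : Int) : Decidable (Spec_nskd c d out) := by unfold Spec_nskd; infer_instance

-- ===== CLAIM (what is proved, stated in full; the proofs are below) =====
def Claim_equal_nskd : Prop := ∀ (c : Int) (d : Int), Dom_nskd c d → Pre_nskd c d → Spec_nskd c d (nskd c d)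

-- ===== LEMMAS AND PROOFS =====

-- A's loop appends i and (when d % i ≠ 0) removes the copy it just appended, so it is a filter.
theorem nskd_fold_filter (c d : Int) (L : List Int) (acc : List Int)
    (hlt : ∀ x ∈ acc, ∀ i ∈ L, x < i) (hL : L.Pairwise (· < ·)) :
    L.foldl (nskdStep c d) acc
      = acc ++ L.filter (fun i => decide (PySem.Int.mod i c = 0) && decide (PySem.Int.mod d i = 0)) := by
  induction L generalizing acc with
  | nil => simp
  | cons i t ih =>
    have hit : ∀ x ∈ t, i < x := (List.pairwise_cons.mp hL).1
    have hiacc : i ∉ acc := fun hmem => lt_irrefl i (hlt i hmem i (by simp))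
    have hrem : (PySem.List.remove? (acc ++ [i]) i).getD (acc ++ [i]) = acc := by
      rw [PySem.List.remove?_eq_some_erase (acc ++ [i]) i (by simp)]
      simp [List.erase_append_right _ hiacc]
    have hlt' : ∀ x ∈ acc, ∀ j ∈ t, x < j := fun x hx j hj => lt_trans (hlt x hx i (by simp)) (hit j hj)
    have hlt'' : ∀ x ∈ acc ++ [i], ∀ j ∈ t, x < j := by
      intro x hx j hj
      rcases List.mem_append.mp hx with h | h
      · exact hlt' x h j hj
      · simp at h; subst h; exact hit j hj
    have hLt : t.Pairwise (· < ·) := (List.pairwise_cons.mp hL).2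
    rw [List.foldl_cons]
    by_cases h1 : PySem.Int.mod i c = 0
    · by_cases h2 : PySem.Int.mod d i = 0
      · have hstep : nskdStep c d acc i = acc ++ [i] := by simp [nskdStep, h1, h2]
        rw [hstep, ih (acc ++ [i]) hlt'' hLt]
        simp [h1, h2]
      · have hstep : nskdStep c d acc i = acc := by simp [nskdStep, h1, h2, hrem]
        rw [hstep, ih acc hlt' hLt]
        simp [h1, h2]
    · have hstep : nskdStep c d acc i = acc := by simp [nskdStep, h1]
      rw [hstep, ih acc hlt' hLt]
      simp [h1]

-- bridge: length of a filtered List.range is the card of the filtered Finset.range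
theorem list_count_finset (D : ℕ) (q : ℕ → Prop) [DecidablePred q] :
    ((List.range D).filter (fun k => decide (q k))).length = ((Finset.range D).filter q).card := by
  induction D with
  | zero => simp
  | succ n ih =>
    rw [List.range_succ, List.filter_append, List.length_append, Finset.range_add_one,
        Finset.filter_insert]
    by_cases h : q n
    · rw [if_pos h, Finset.card_insert_of_notMem (by simp)]
      simp [h, ih]
    · rw [if_neg h]
      simp [h, ih]

-- A's value is the count of k < d with |c| ∣ k+1 and k+1 ∣ d, minus 2
theorem nskd_eq_count (c d : Int) (hd : 1 ≤ d) :
    nskd c d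
      = (((Finset.range d.toNat).filter (fun k => c.natAbs ∣ (k + 1) ∧ (k + 1) ∣ d.toNat)).card : Int) - 2 := by
  have hdD : d = (d.toNat : Int) := (Int.toNat_of_nonneg (by omega)).symm
  unfold nskd
  rw [nskd_fold_filter c d _ [] (by simp) (PySem.List.pairwise_lt_pyRange_one 1 (d + 1))]
  rw [List.nil_append, PySem.List.pyRange_one 1 (d + 1)]
  have harg : (d + 1 - 1).toNat = d.toNat := by omega
  rw [harg, List.filter_map]
  simp only [List.length_map]
  have hcongr : (List.range d.toNat).filter
        ((fun i => decide (PySem.Int.mod i c = 0) && decide (PySem.Int.mod d i = 0)) ∘ (fun (k : ℕ) => 1 + (k : Int)))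
      = (List.range d.toNat).filter (fun k => decide (c.natAbs ∣ (k + 1) ∧ (k + 1) ∣ d.toNat)) := by
    apply List.filter_congr
    intro k _
    have hcast : (1 : Int) + (k : Int) = ((k + 1 : ℕ) : Int) := by push_cast; ring
    simp only [Function.comp, Bool.decide_and]
    have h1 : PySem.Int.mod (1 + (k : Int)) c = 0 ↔ c.natAbs ∣ (k + 1) := by
      rw [hcast, PySem.Int.mod_eq_zero_iff_dvd, ← Int.natAbs_dvd, Int.natCast_dvd_natCast]
    have h2 : PySem.Int.mod d (1 + (k : Int)) = 0 ↔ (k + 1) ∣ d.toNat := by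
      rw [hcast, PySem.Int.mod_eq_zero_iff_dvd]
      conv_lhs => rw [hdD]
      exact Int.natCast_dvd_natCast
    rw [decide_eq_decide.mpr h1, decide_eq_decide.mpr h2]
  rw [hcongr, list_count_finset]

-- the counting bijection k ↦ (k+1)/E between A's accepted indices and the divisors of D/E
theorem count_A_eq_divisors (E D : ℕ) (hE : 1 ≤ E) (hD : 1 ≤ D) (hdvd : E ∣ D) :
    ((Finset.range D).filter (fun k => E ∣ (k + 1) ∧ (k + 1) ∣ D)).card = (D / E).divisors.card := by
  have hDN : D = E * (D / E) := (Nat.mul_div_cancel' hdvd).symm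
  have hNpos : 0 < D / E := Nat.div_pos (Nat.le_of_dvd (by omega) hdvd) (by omega)
  apply Finset.card_bij' (fun k _ => (k + 1) / E) (fun m _ => E * m - 1)
  · intro k hk
    simp only [Finset.mem_filter, Finset.mem_range] at hk
    obtain ⟨hkD, hEk, hkdvd⟩ := hk
    rw [Nat.mem_divisors]
    refine ⟨?_, by omega⟩
    obtain ⟨m, hm⟩ := hEk
    obtain ⟨q, hq⟩ := hkdvd
    refine ⟨q, ?_⟩
    rw [hm, Nat.mul_div_cancel_left _ (by omega)]
    have hD' : D = E * (m * q) := by rw [hq, hm]; ring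
    rw [hD', Nat.mul_div_cancel_left _ (by omega)]
  · intro m hm
    rw [Nat.mem_divisors] at hm
    obtain ⟨hmdvd, _⟩ := hm
    have hm1 : 0 < m := Nat.pos_of_dvd_of_pos hmdvd (by omega)
    have hEm : 0 < E * m := Nat.mul_pos (by omega) hm1
    have hEmD : E * m ∣ D := by
      obtain ⟨q, hq⟩ := hmdvd
      exact ⟨q, by rw [hDN, hq]; ring⟩
    have hEmle : E * m ≤ D := Nat.le_of_dvd (by omega) hEmD
    simp only [Finset.mem_filter, Finset.mem_range]
    have h1 : E * m - 1 + 1 = E * m := by omega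
    exact ⟨by omega, by rw [h1]; exact ⟨m, rfl⟩, by rw [h1]; exact hEmD⟩
  · intro k hk
    simp only [Finset.mem_filter, Finset.mem_range] at hk
    have := Nat.mul_div_cancel' hk.2.1
    omega
  · intro m hm
    rw [Nat.mem_divisors] at hm
    have hm1 : 0 < m := Nat.pos_of_dvd_of_pos hm.1 (by omega)
    have hEm : 0 < E * m := Nat.mul_pos (by omega) hm1
    rw [Nat.sub_add_cancel (by omega), Nat.mul_div_cancel_left _ (by omega)]

-- B's loop sums the weights 1 (square root) / 2 over the divisors j ≥ i with j*j ≤ N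
theorem loopB_sum (N : ℕ) (hN : 1 ≤ N) : ∀ (fuel i : ℕ), N + 1 - i ≤ fuel → 1 ≤ i → ∀ cnt : Int,
    nskdAltLoop (N : Int) (i : Int) cnt
      = cnt + ∑ j ∈ N.divisors.filter (fun j => i ≤ j ∧ j * j ≤ N), (if j * j = N then (1 : Int) else 2) := by
  intro fuel
  induction fuel with
  | zero =>
    intro i hle hi cnt
    have hiN : N < i := by omega
    rw [nskdAltLoop]
    rw [dif_neg (by nlinarith)]
    have : N.divisors.filter (fun j => i ≤ j ∧ j * j ≤ N) = ∅ := by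
      apply Finset.filter_false_of_mem
      intro j hj
      have := Nat.le_of_dvd (by omega) (Nat.mem_divisors.mp hj).1
      omega
    rw [this]; simp
  | succ fuel ih =>
    intro i hle hi cnt
    rw [nskdAltLoop]
    by_cases hsq : (i : Int) * (i : Int) ≤ (N : Int)
    · rw [dif_pos hsq]
      have hsqN : i * i ≤ N := by exact_mod_cast hsq
      have hiN : i ≤ N := le_trans (Nat.le_mul_of_pos_left i (by omega)) hsqN
      rw [show ((i : Int) + 1) = ((i + 1 : ℕ) : Int) by push_cast; ring]
      rw [ih (i + 1) (by omega) (by omega)]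
      have hmod : (PySem.Int.mod (N : Int) (i : Int) = 0) ↔ i ∣ N := by
        rw [PySem.Int.mod_eq_zero_iff_dvd]
        exact Int.natCast_dvd_natCast
      by_cases hdvd : i ∣ N
      · have hins : N.divisors.filter (fun j => i ≤ j ∧ j * j ≤ N)
            = insert i (N.divisors.filter (fun j => i + 1 ≤ j ∧ j * j ≤ N)) := by
          apply Finset.ext
          intro j
          simp only [Finset.mem_insert, Finset.mem_filter, Nat.mem_divisors]
          constructor
          · intro ⟨hd, hij, hjj⟩
            rcases eq_or_lt_of_le hij with h | h
            · exact Or.inl h.symm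
            · exact Or.inr ⟨hd, by omega, hjj⟩
          · rintro (rfl | ⟨hd, hij, hjj⟩)
            · exact ⟨⟨hdvd, by omega⟩, le_refl _, hsqN⟩
            · exact ⟨hd, by omega, hjj⟩
        rw [hins, Finset.sum_insert (by simp)]
        rw [if_pos (hmod.mpr hdvd)]
        have hiff : ((i : Int) * (i : Int) = (N : Int)) ↔ (i * i = N) := by exact_mod_cast Iff.rfl
        by_cases hsq2 : i * i = N
        · rw [if_pos (hiff.mpr hsq2), if_pos hsq2]; ring
        · rw [if_neg (fun h => hsq2 (hiff.mp h)), if_neg hsq2]; ring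
      · rw [if_neg (fun h => hdvd (hmod.mp h))]
        have heq : N.divisors.filter (fun j => i ≤ j ∧ j * j ≤ N)
            = N.divisors.filter (fun j => i + 1 ≤ j ∧ j * j ≤ N) := by
          apply Finset.filter_congr
          intro j hj
          have hjd := (Nat.mem_divisors.mp hj).1
          constructor
          · intro ⟨hij, hjj⟩
            refine ⟨?_, hjj⟩
            rcases eq_or_lt_of_le hij with h | h
            · exact absurd (h ▸ hjd) hdvd
            · omega
          · intro ⟨hij, hjj⟩; exact ⟨by omega, hjj⟩
        rw [heq]; ring
    · rw [dif_neg hsq]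
      have : N.divisors.filter (fun j => i ≤ j ∧ j * j ≤ N) = ∅ := by
        apply Finset.filter_false_of_mem
        intro j hj
        intro ⟨hij, hjj⟩
        have : i * i ≤ N := le_trans (Nat.mul_le_mul hij hij) hjj
        exact hsq (by exact_mod_cast this)
      rw [this]; simp

-- divisors split at the square root: the large divisors pair off with the small ones
theorem sqrt_pairing_card (N : ℕ) (hN : 1 ≤ N) :
    N.divisors.card
      = (N.divisors.filter (fun j => j * j < N)).card
        + (N.divisors.filter (fun j => j * j = N)).card
        + (N.divisors.filter (fun j => j * j < N)).card := by
  have hsplit : N.divisors.card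
      = (N.divisors.filter (fun j => j * j ≤ N)).card + (N.divisors.filter (fun j => ¬ j * j ≤ N)).card :=
    (Finset.filter_card_add_filter_neg_card_eq_card _).symm
  have hle : (N.divisors.filter (fun j => j * j ≤ N)).card
      = (N.divisors.filter (fun j => j * j < N)).card + (N.divisors.filter (fun j => j * j = N)).card := by
    rw [← Finset.filter_card_add_filter_neg_card_eq_card (p := fun j => j * j < N)
          (s := N.divisors.filter (fun j => j * j ≤ N))]
    congr 1
    · apply congrArg Finset.card
      rw [Finset.filter_filter]
      apply Finset.filter_congr; intro j hj; constructor <;> intro h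
      · omega
      · exact ⟨Nat.le_of_lt h, h⟩
    · apply congrArg Finset.card
      rw [Finset.filter_filter]
      apply Finset.filter_congr; intro j hj; constructor <;> intro h
      · omega
      · exact ⟨Nat.le_of_eq h, by omega⟩
  have hbij : (N.divisors.filter (fun j => ¬ j * j ≤ N)).card
      = (N.divisors.filter (fun j => j * j < N)).card := by
    apply Finset.card_bij' (fun j _ => N / j) (fun j _ => N / j)
    · intro j hj
      simp only [Finset.mem_filter, Nat.mem_divisors] at *
      obtain ⟨⟨hjd, hN0⟩, hgt⟩ := hj
      have hj0 : 0 < j := Nat.pos_of_dvd_of_pos hjd (by omega)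
      have hNj : N / j * j = N := Nat.div_mul_cancel hjd
      refine ⟨⟨Nat.div_dvd_of_dvd hjd, hN0⟩, ?_⟩
      have hlt : N / j < j := by
        by_contra hge
        push_neg at hge
        have : j * j ≤ N / j * j := Nat.mul_le_mul_right _ hge
        omega
      calc N / j * (N / j) < j * (N / j) := by
            apply Nat.mul_lt_mul_of_lt_of_le hlt (le_refl _)
            have : 0 < N / j := Nat.div_pos (Nat.le_of_dvd (by omega) hjd) hj0
            omega
        _ = N := by rw [Nat.mul_comm]; exact hNj
    · intro j hj
      simp only [Finset.mem_filter, Nat.mem_divisors] at *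
      obtain ⟨⟨hjd, hN0⟩, hlt⟩ := hj
      have hj0 : 0 < j := Nat.pos_of_dvd_of_pos hjd (by omega)
      have hNj : N / j * j = N := Nat.div_mul_cancel hjd
      refine ⟨⟨Nat.div_dvd_of_dvd hjd, hN0⟩, ?_⟩
      have hgt : j < N / j := by
        by_contra hge
        push_neg at hge
        have : N / j * j ≤ j * j := Nat.mul_le_mul_right _ hge
        omega
      intro hle2
      nlinarith [hNj, hgt, hj0]
    · intro j hj
      simp only [Finset.mem_filter, Nat.mem_divisors] at hj
      exact Nat.div_div_self hj.1.1 hj.1.2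
    · intro j hj
      simp only [Finset.mem_filter, Nat.mem_divisors] at hj
      exact Nat.div_div_self hj.1.1 hj.1.2
  omega

-- the sqrt-pairing identity: the weighted count of small divisors is the number of divisors
theorem pairing (N : ℕ) (hN : 1 ≤ N) :
    (∑ j ∈ N.divisors.filter (fun j => 1 ≤ j ∧ j * j ≤ N), (if j * j = N then (1 : Int) else 2))
      = (N.divisors.card : Int) := by
  have h1 : N.divisors.filter (fun j => 1 ≤ j ∧ j * j ≤ N) = N.divisors.filter (fun j => j * j ≤ N) := by
    apply Finset.filter_congr; intro j hj
    have := Nat.pos_of_mem_divisors hj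
    simp; omega
  rw [h1]
  have hsplit : N.divisors.filter (fun j => j * j ≤ N)
      = N.divisors.filter (fun j => j * j = N) ∪ N.divisors.filter (fun j => j * j < N) := by
    rw [← Finset.filter_or]
    apply Finset.filter_congr; intro j hj; omega
  have hdisj : Disjoint (N.divisors.filter (fun j => j * j = N)) (N.divisors.filter (fun j => j * j < N)) := by
    apply Finset.disjoint_filter_filter'
    rw [disjoint_iff_inf_le]
    intro j hj
    simp only [Pi.inf_apply, inf_Prop_eq] at hj
    omega
  rw [hsplit, Finset.sum_union hdisj]
  have hA : (∑ j ∈ N.divisors.filter (fun j => j * j = N), (if j * j = N then (1 : Int) else 2))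
      = (N.divisors.filter (fun j => j * j = N)).card := by
    rw [Finset.sum_congr rfl (fun j hj => by simp only [Finset.mem_filter] at hj; rw [if_pos hj.2])]
    simp
  have hB : (∑ j ∈ N.divisors.filter (fun j => j * j < N), (if j * j = N then (1 : Int) else 2))
      = 2 * (N.divisors.filter (fun j => j * j < N)).card := by
    rw [Finset.sum_congr rfl (fun j hj => by simp only [Finset.mem_filter] at hj; rw [if_neg (by omega)])]
    simp [mul_comm]
  rw [hA, hB]
  have := sqrt_pairing_card N hN
  omega

-- ===== VERDICT (by name: the statement is the Claim_ definition above) =====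
theorem nskd_spec : Claim_equal_nskd := by
  intro c d _ hpre
  unfold Spec_nskd
  by_cases hd : d < 1
  · unfold nskd nskd_alt
    rw [PySem.List.pyRange_one_eq_nil (by omega), if_pos hd]
    simp
  · have hc : c ≠ 0 := hpre.resolve_right hd
    have hd1 : 1 ≤ d := by omega
    set E := c.natAbs with hE
    set D := d.toNat with hD
    have hEpos : 1 ≤ E := by
      have := Int.natAbs_pos.mpr hc
      omega
    have hDpos : 1 ≤ D := by omega
    have habs : |c| = (E : Int) := Int.abs_eq_natAbs c
    have hdD : d = (D : Int) := (Int.toNat_of_nonneg (by omega)).symm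
    have hmodE : (PySem.Int.mod d ((E : ℕ) : Int) = 0) ↔ E ∣ D := by
      rw [PySem.Int.mod_eq_zero_iff_dvd]
      conv_lhs => rw [hdD]
      exact Int.natCast_dvd_natCast
    rw [nskd_eq_count c d hd1]
    unfold nskd_alt
    rw [if_neg hd]
    simp only [habs]
    by_cases hdvd : E ∣ D
    · rw [if_neg (by simpa using hmodE.mpr hdvd)]
      have hfd : PySem.Int.floordiv d ((E : ℕ) : Int) = ((D / E : ℕ) : Int) := by
        conv_lhs => rw [hdD]
        exact PySem.Int.floordiv_natCast D E
      rw [hfd]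
      have hN : 1 ≤ D / E := Nat.div_pos (Nat.le_of_dvd (by omega) hdvd) (by omega)
      have hloop := loopB_sum (D / E) hN (D / E + 1) 1 (by omega) (le_refl 1) 0
      rw [Nat.cast_one] at hloop
      rw [hloop, zero_add, pairing (D / E) hN, count_A_eq_divisors E D hEpos hDpos hdvd]
    · rw [if_pos (by simpa using fun h => hdvd (hmodE.mp h))]
      have hempty : (Finset.range D).filter (fun k => E ∣ (k + 1) ∧ (k + 1) ∣ D) = ∅ := by
        apply Finset.filter_false_of_mem
        intro k _
        intro ⟨h1, h2⟩
        exact hdvd (dvd_trans h1 h2)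
      rw [hempty]
      simp
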